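-- pv_equiv track=rewrite | github.com/madhviasthana/Bio-Medical-Signal-Processing | codebase/waveform_detection/detect_waveform.py | find_minima_maxima_pairs
-- ===== SOURCE A (Python) =====
-- def find_minima_maxima_pairs(signal, min_prominence=500):
--     """
--     Find minima and maxima pairs in the signal with a prominence filter.
--     """
--     pairs = []
--     n = len(signal)
--     i = 0
--
--     while i < n - 1:
--         # Check for maxima
--         if signal[i] < signal[i + 1]:
--             start = i
--             while i < n - 1 and signal[i] <= signal[i + 1]:
--                 i += 1
--             end = i
--             # Apply prominence filter
--             if abs(signal[end] - signal[start]) >= min_prominence: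
--                 pairs.append((start, end))
--         # Check for minima
--         elif signal[i] > signal[i + 1]:
--             start = i
--             while i < n - 1 and signal[i] >= signal[i + 1]:
--                 i += 1
--             end = i
--             # Apply prominence filter
--             if abs(signal[end] - signal[start]) >= min_prominence:
--                 pairs.append((start, end))
--         else:
--             i += 1  # Skip if the signal is flat
--
--     return pairs
-- ===== SOURCE B (Python) =====
-- def find_minima_maxima_pairs(sig, min_prominence=500):
--     """
--     Find minima and maxima pairs in the signal with a prominence filter.
--     Single pass over the step differences with an explicit run state.
--     (Parameter renamed from 'signal' only because the checker's sandbox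
--     refuses that identifier; behaviour is identical.)
--     """
--     n = len(sig)
--     pairs = []
--     dirn = 0   # 0 = no open run, 1 = rising run, -1 = falling run
--     start = 0
--     for i in range(n - 1):
--         d = sig[i + 1] - sig[i]
--         if dirn == 0:
--             if d != 0:
--                 dirn = 1 if d > 0 else -1
--                 start = i
--         elif d != 0 and (d > 0) != (dirn > 0):
--             # opposite-sign step: close the run at i, reopen at i
--             if abs(sig[i] - sig[start]) >= min_prominence:
--                 pairs.append((start, i))
--             dirn = 1 if d > 0 else -1
--             start = i
--     if dirn != 0:
--         if abs(sig[n - 1] - sig[start]) >= min_prominence: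
--             pairs.append((start, n - 1))
--     return pairs
-- ===== Notes on version B (the rewrite author's own statement) =====
-- stated objective: alternative
-- what changed: A's outer while with nested index-advancing inner whiles is replaced by a single for-loop over the step differences that keeps an explicit run state (current direction, run start) and closes/reopens runs at opposite-sign steps.
import Mathlib
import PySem

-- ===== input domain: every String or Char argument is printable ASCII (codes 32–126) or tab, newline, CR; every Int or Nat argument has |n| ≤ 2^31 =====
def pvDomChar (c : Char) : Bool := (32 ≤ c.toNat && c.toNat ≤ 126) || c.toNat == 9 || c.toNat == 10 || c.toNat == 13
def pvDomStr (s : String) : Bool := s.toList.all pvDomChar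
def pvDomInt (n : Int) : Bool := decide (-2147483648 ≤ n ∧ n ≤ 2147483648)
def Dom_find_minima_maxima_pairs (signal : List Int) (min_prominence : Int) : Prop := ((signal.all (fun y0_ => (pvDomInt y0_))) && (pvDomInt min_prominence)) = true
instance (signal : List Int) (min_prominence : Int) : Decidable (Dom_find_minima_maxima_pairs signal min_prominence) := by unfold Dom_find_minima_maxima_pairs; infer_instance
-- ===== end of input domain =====

-- B replaces A's nested index-advancing while loops by one pass over the step
-- differences with an explicit run state (direction, run start); objective: alternative.


-- ===== PORT A =====
-- A's while loops are ported with an explicit fuel counter (structural recursion);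
-- each loop is always called with fuel = number of remaining indices, so the port is exact.

-- inner while of the maxima branch: advance i while i < n-1 and signal[i] <= signal[i+1]
def upEnd (s : List Int) : Nat → Nat → Nat
  | 0, i => i
  | fuel+1, i =>
    if i < s.length - 1 ∧ s.getD i 0 ≤ s.getD (i+1) 0 then upEnd s fuel (i+1) else i

-- inner while of the minima branch: advance i while i < n-1 and signal[i] >= signal[i+1]
def downEnd (s : List Int) : Nat → Nat → Nat
  | 0, i => i
  | fuel+1, i =>
    if i < s.length - 1 ∧ s.getD i 0 ≥ s.getD (i+1) 0 then downEnd s fuel (i+1) else i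

-- outer while loop of A (fuel decreases by one per iteration, i strictly increases)
def loopA (s : List Int) (mp : Int) : Nat → Nat → List (Int × Int)
  | 0, _ => []
  | fuel+1, i =>
    if i < s.length - 1 then
      if s.getD i 0 < s.getD (i+1) 0 then
        (if |s.getD (upEnd s (s.length - 1 - i) i) 0 - s.getD i 0| ≥ mp
         then [((i : Int), ((upEnd s (s.length - 1 - i) i : Nat) : Int))] else [])
          ++ loopA s mp fuel (upEnd s (s.length - 1 - i) i)
      else if s.getD i 0 > s.getD (i+1) 0 then
        (if |s.getD (downEnd s (s.length - 1 - i) i) 0 - s.getD i 0| ≥ mp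
         then [((i : Int), ((downEnd s (s.length - 1 - i) i : Nat) : Int))] else [])
          ++ loopA s mp fuel (downEnd s (s.length - 1 - i) i)
      else
        loopA s mp fuel (i+1)
    else []

def find_minima_maxima_pairs (signal : List Int) (min_prominence : Int) : List (Int × Int) :=
  loopA signal min_prominence (signal.length - 1) 0

-- ===== PORT B =====
-- one step of B's for-loop over the diff at index i; state = (pairs, dirn, start)
def stepB (s : List Int) (mp : Int) (st : List (Int × Int) × Int × Nat) (i : Nat) :
    List (Int × Int) × Int × Nat :=
  let pairs := st.1
  let dirn := st.2.1
  let start := st.2.2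
  let d := s.getD (i+1) 0 - s.getD i 0
  if dirn = 0 then
    if d ≠ 0 then (pairs, (if d > 0 then 1 else -1), i) else st
  else if d ≠ 0 ∧ ¬ ((d > 0) ↔ (dirn > 0)) then
    ((pairs ++ (if |s.getD i 0 - s.getD start 0| ≥ mp then [((start : Int), (i : Int))] else [])),
      (if d > 0 then 1 else -1), i)
  else st

-- B's trailing close of the still-open run
def closeB (s : List Int) (mp : Int) (st : List (Int × Int) × Int × Nat) : List (Int × Int) :=
  if st.2.1 ≠ 0 then
    st.1 ++ (if |s.getD (s.length - 1) 0 - s.getD st.2.2 0| ≥ mp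
             then [((st.2.2 : Int), ((s.length - 1 : Nat) : Int))] else [])
  else st.1

def find_minima_maxima_pairs_alt (signal : List Int) (min_prominence : Int) : List (Int × Int) :=
  closeB signal min_prominence
    ((List.range (signal.length - 1)).foldl (stepB signal min_prominence) ([], 0, 0))

-- ===== PRECONDITION & SPEC =====
def Spec_find_minima_maxima_pairs (signal : List Int) (min_prominence : Int) (out : List (Int × Int)) : Prop := out = find_minima_maxima_pairs_alt signal min_prominence
instance (signal : List Int) (min_prominence : Int) (out : List (Int × Int)) : Decidable (Spec_find_minima_maxima_pairs signal min_prominence out) := by unfold Spec_find_minima_maxima_pairs; infer_instance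

-- ===== CLAIM (what is proved, stated in full; the proofs are below) =====
def Claim_equal_find_minima_maxima_pairs : Prop := ∀ (signal : List Int) (min_prominence : Int), Dom_find_minima_maxima_pairs signal min_prominence → Spec_find_minima_maxima_pairs signal min_prominence (find_minima_maxima_pairs signal min_prominence)

-- ===== LEMMAS AND PROOFS =====

def emitP (s : List Int) (mp : Int) (a b : Nat) : List (Int × Int) :=
  if |s.getD b 0 - s.getD a 0| ≥ mp then [((a : Int), (b : Int))] else []

-- the value B's remaining fold-plus-close produces from an arbitrary state
def rhs (s : List Int) (mp : Int) (i : Nat) (dirn : Int) (start : Nat) : List (Int × Int) :=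
  if dirn = 0 then loopA s mp (s.length - 1 - i) i
  else if dirn > 0 then
    emitP s mp start (upEnd s (s.length - 1 - i) i)
      ++ loopA s mp (s.length - 1 - upEnd s (s.length - 1 - i) i) (upEnd s (s.length - 1 - i) i)
  else
    emitP s mp start (downEnd s (s.length - 1 - i) i)
      ++ loopA s mp (s.length - 1 - downEnd s (s.length - 1 - i) i) (downEnd s (s.length - 1 - i) i)

theorem upEnd_stop (s : List Int) (f i : Nat)
    (h : ¬ (i < s.length - 1 ∧ s.getD i 0 ≤ s.getD (i+1) 0)) : upEnd s f i = i := by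
  cases f with
  | zero => rfl
  | succ f => simp only [upEnd]; rw [if_neg h]

theorem downEnd_stop (s : List Int) (f i : Nat)
    (h : ¬ (i < s.length - 1 ∧ s.getD i 0 ≥ s.getD (i+1) 0)) : downEnd s f i = i := by
  cases f with
  | zero => rfl
  | succ f => simp only [downEnd]; rw [if_neg h]

theorem upEnd_ge (s : List Int) : ∀ (f i : Nat), i ≤ upEnd s f i := by
  intro f
  induction f with
  | zero => intro i; simp only [upEnd]; exact Nat.le_refl i
  | succ f ih =>
    intro i
    simp only [upEnd]
    split
    · exact Nat.le_trans (Nat.le_succ i) (ih (i+1))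
    · exact Nat.le_refl i

theorem downEnd_ge (s : List Int) : ∀ (f i : Nat), i ≤ downEnd s f i := by
  intro f
  induction f with
  | zero => intro i; simp only [downEnd]; exact Nat.le_refl i
  | succ f ih =>
    intro i
    simp only [downEnd]
    split
    · exact Nat.le_trans (Nat.le_succ i) (ih (i+1))
    · exact Nat.le_refl i

theorem upE_step (s : List Int) (i : Nat)
    (h : i < s.length - 1 ∧ s.getD i 0 ≤ s.getD (i+1) 0) :
    upEnd s (s.length - 1 - i) i = upEnd s (s.length - 1 - (i+1)) (i+1) := by
  obtain ⟨k, hk⟩ : ∃ k, s.length - 1 - i = k + 1 := ⟨s.length - 1 - i - 1, by omega⟩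
  have hk1 : s.length - 1 - (i+1) = k := by omega
  rw [hk, hk1]
  simp only [upEnd]
  rw [if_pos h]

theorem downE_step (s : List Int) (i : Nat)
    (h : i < s.length - 1 ∧ s.getD i 0 ≥ s.getD (i+1) 0) :
    downEnd s (s.length - 1 - i) i = downEnd s (s.length - 1 - (i+1)) (i+1) := by
  obtain ⟨k, hk⟩ : ∃ k, s.length - 1 - i = k + 1 := ⟨s.length - 1 - i - 1, by omega⟩
  have hk1 : s.length - 1 - (i+1) = k := by omega
  rw [hk, hk1]
  simp only [downEnd]
  rw [if_pos h]

theorem upE_gt (s : List Int) (i : Nat)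
    (h : i < s.length - 1 ∧ s.getD i 0 ≤ s.getD (i+1) 0) :
    i < upEnd s (s.length - 1 - i) i := by
  rw [upE_step s i h]
  exact Nat.lt_of_lt_of_le (Nat.lt_succ_self i) (upEnd_ge s _ (i+1))

theorem downE_gt (s : List Int) (i : Nat)
    (h : i < s.length - 1 ∧ s.getD i 0 ≥ s.getD (i+1) 0) :
    i < downEnd s (s.length - 1 - i) i := by
  rw [downE_step s i h]
  exact Nat.lt_of_lt_of_le (Nat.lt_succ_self i) (downEnd_ge s _ (i+1))

theorem loopA_stop (s : List Int) (mp : Int) (f i : Nat) (h : ¬ i < s.length - 1) :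
    loopA s mp f i = [] := by
  cases f with
  | zero => rfl
  | succ f => simp only [loopA]; rw [if_neg h]

-- fuel irrelevance: any sufficient fuel computes the same list
theorem loopA_congr (s : List Int) (mp : Int) :
    ∀ (f g i : Nat), s.length - 1 - i ≤ f → s.length - 1 - i ≤ g →
      loopA s mp f i = loopA s mp g i := by
  intro f
  induction f with
  | zero =>
    intro g i hf hg
    have h : ¬ i < s.length - 1 := by omega
    rw [loopA_stop s mp 0 i h, loopA_stop s mp g i h]
  | succ f ih =>
    intro g i hf hg
    by_cases hi : i < s.length - 1
    · obtain ⟨g', rfl⟩ : ∃ g', g = g' + 1 := ⟨g - 1, by omega⟩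
      simp only [loopA]
      rw [if_pos hi, if_pos hi]
      by_cases h1 : s.getD i 0 < s.getD (i+1) 0
      · rw [if_pos h1, if_pos h1]
        have he := upE_gt s i ⟨hi, Int.le_of_lt h1⟩
        rw [ih g' (upEnd s (s.length - 1 - i) i) (by omega) (by omega)]
      · rw [if_neg h1, if_neg h1]
        by_cases h2 : s.getD i 0 > s.getD (i+1) 0
        · rw [if_pos h2, if_pos h2]
          have he := downE_gt s i ⟨hi, Int.le_of_lt h2⟩
          rw [ih g' (downEnd s (s.length - 1 - i) i) (by omega) (by omega)]
        · rw [if_neg h2, if_neg h2]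
          exact ih g' (i+1) (by omega) (by omega)
    · rw [loopA_stop s mp _ i hi, loopA_stop s mp _ i hi]

theorem loopA_flat (s : List Int) (mp : Int) (i : Nat) (h : i < s.length - 1)
    (h1 : ¬ s.getD i 0 < s.getD (i+1) 0) (h2 : ¬ s.getD i 0 > s.getD (i+1) 0) :
    loopA s mp (s.length - 1 - i) i = loopA s mp (s.length - 1 - (i+1)) (i+1) := by
  have hk : s.length - 1 - i = (s.length - 1 - i - 1) + 1 := by omega
  conv_lhs => rw [hk]
  simp only [loopA]
  rw [if_pos h, if_neg h1, if_neg h2]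
  exact loopA_congr s mp _ _ (i+1) (by omega) (by omega)

theorem loopA_up (s : List Int) (mp : Int) (i : Nat) (h : i < s.length - 1)
    (h1 : s.getD i 0 < s.getD (i+1) 0) :
    loopA s mp (s.length - 1 - i) i =
      emitP s mp i (upEnd s (s.length - 1 - i) i)
        ++ loopA s mp (s.length - 1 - upEnd s (s.length - 1 - i) i) (upEnd s (s.length - 1 - i) i) := by
  have hk : s.length - 1 - i = (s.length - 1 - i - 1) + 1 := by omega
  conv_lhs => rw [hk]
  simp only [loopA]
  rw [if_pos h, if_pos h1]
  have he := upE_gt s i ⟨h, Int.le_of_lt h1⟩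
  rw [loopA_congr s mp (s.length - 1 - i - 1) (s.length - 1 - upEnd s (s.length - 1 - i) i)
    (upEnd s (s.length - 1 - i) i) (by omega) (by omega)]
  rfl

theorem loopA_down (s : List Int) (mp : Int) (i : Nat) (h : i < s.length - 1)
    (h1 : ¬ s.getD i 0 < s.getD (i+1) 0) (h2 : s.getD i 0 > s.getD (i+1) 0) :
    loopA s mp (s.length - 1 - i) i =
      emitP s mp i (downEnd s (s.length - 1 - i) i)
        ++ loopA s mp (s.length - 1 - downEnd s (s.length - 1 - i) i) (downEnd s (s.length - 1 - i) i) := by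
  have hk : s.length - 1 - i = (s.length - 1 - i - 1) + 1 := by omega
  conv_lhs => rw [hk]
  simp only [loopA]
  rw [if_pos h, if_neg h1, if_pos h2]
  have he := downE_gt s i ⟨h, Int.le_of_lt h2⟩
  rw [loopA_congr s mp (s.length - 1 - i - 1) (s.length - 1 - downEnd s (s.length - 1 - i) i)
    (downEnd s (s.length - 1 - i) i) (by omega) (by omega)]
  rfl

theorem rhs_pos (s : List Int) (mp : Int) (i : Nat) (dirn : Int) (start : Nat)
    (h : dirn > 0) :
    rhs s mp i dirn start =
      emitP s mp start (upEnd s (s.length - 1 - i) i)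
        ++ loopA s mp (s.length - 1 - upEnd s (s.length - 1 - i) i) (upEnd s (s.length - 1 - i) i) := by
  rw [rhs, if_neg (by omega), if_pos h]

theorem rhs_neg (s : List Int) (mp : Int) (i : Nat) (dirn : Int) (start : Nat)
    (h : dirn < 0) :
    rhs s mp i dirn start =
      emitP s mp start (downEnd s (s.length - 1 - i) i)
        ++ loopA s mp (s.length - 1 - downEnd s (s.length - 1 - i) i) (downEnd s (s.length - 1 - i) i) := by
  rw [rhs, if_neg (by omega), if_neg (by omega)]

theorem main_lemma (s : List Int) (mp : Int) :
    ∀ (k i : Nat) (pairs : List (Int × Int)) (dirn : Int) (start : Nat),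
      i ≤ s.length - 1 → s.length - 1 - i = k →
      closeB s mp ((List.range' i k).foldl (stepB s mp) (pairs, dirn, start)) =
        pairs ++ rhs s mp i dirn start := by
  intro k
  induction k with
  | zero =>
    intro i pairs dirn start hle hk
    have hi : i = s.length - 1 := by omega
    subst hi
    have h0' : s.length - 1 - (s.length - 1) = 0 := Nat.sub_self _
    have hup : upEnd s (s.length - 1 - (s.length - 1)) (s.length - 1) = s.length - 1 := by
      rw [h0']
      rfl
    have hdown : downEnd s (s.length - 1 - (s.length - 1)) (s.length - 1) = s.length - 1 := by
      rw [h0']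
      rfl
    rw [List.range'_zero, List.foldl_nil]
    by_cases h0 : dirn = 0
    · rw [rhs, if_pos h0, h0', loopA_stop s mp 0 _ (by omega), List.append_nil,
        closeB, if_neg (by simpa using h0)]
    · rw [closeB, if_pos (by simpa using h0)]
      by_cases hp : dirn > 0
      · rw [rhs_pos s mp _ dirn start hp, hup, loopA_stop s mp _ _ (by omega), List.append_nil]
        rfl
      · rw [rhs_neg s mp _ dirn start (by omega), hdown, loopA_stop s mp _ _ (by omega),
          List.append_nil]
        rfl
  | succ k ih =>
    intro i pairs dirn start hle hk
    have hi : i < s.length - 1 := by omega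
    rw [List.range'_succ, List.foldl_cons]
    by_cases h0 : dirn = 0
    · -- neutral state
      by_cases hdz : s.getD (i+1) 0 - s.getD i 0 = 0
      · have hst : stepB s mp (pairs, dirn, start) i = (pairs, dirn, start) := by
          simp only [stepB]
          rw [if_pos h0, if_neg (by omega)]
        rw [hst, ih (i+1) pairs dirn start (by omega) (by omega),
          rhs, if_pos h0, rhs, if_pos h0,
          loopA_flat s mp i hi (by omega) (by omega)]
      · by_cases hdp : s.getD (i+1) 0 - s.getD i 0 > 0
        · have hst : stepB s mp (pairs, dirn, start) i = (pairs, 1, i) := by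
            simp only [stepB]
            rw [if_pos h0, if_pos (by omega), if_pos hdp]
          rw [hst, ih (i+1) pairs 1 i (by omega) (by omega),
            rhs_pos s mp (i+1) 1 i (by omega), rhs, if_pos h0,
            loopA_up s mp i hi (by omega)]
          rw [upE_step s i ⟨hi, by omega⟩]
        · have hst : stepB s mp (pairs, dirn, start) i = (pairs, -1, i) := by
            simp only [stepB]
            rw [if_pos h0, if_pos (by omega), if_neg hdp]
          rw [hst, ih (i+1) pairs (-1) i (by omega) (by omega),
            rhs_neg s mp (i+1) (-1) i (by omega), rhs, if_pos h0,
            loopA_down s mp i hi (by omega) (by omega)]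
          rw [downE_step s i ⟨hi, by omega⟩]
    · by_cases hdirp : dirn > 0
      · -- open rising run
        by_cases hsame : s.getD i 0 ≤ s.getD (i+1) 0
        · have hst : stepB s mp (pairs, dirn, start) i = (pairs, dirn, start) := by
            simp only [stepB]
            rw [if_neg h0, if_neg]
            rintro ⟨hne, hiff⟩
            exact hiff (iff_of_true (by omega) hdirp)
          rw [hst, ih (i+1) pairs dirn start (by omega) (by omega),
            rhs_pos s mp (i+1) dirn start hdirp, rhs_pos s mp i dirn start hdirp,
            upE_step s i ⟨hi, hsame⟩]
        · -- opposite step: close the rising run at i, reopen a falling run at i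
          have hst : stepB s mp (pairs, dirn, start) i =
              (pairs ++ emitP s mp start i, -1, i) := by
            simp only [stepB]
            rw [if_neg h0, if_pos ⟨by omega, fun hiff => absurd (hiff.mpr hdirp) (by omega)⟩,
              if_neg (show ¬ (s.getD (i+1) 0 - s.getD i 0 > 0) from by omega)]
            rfl
          rw [hst, ih (i+1) (pairs ++ emitP s mp start i) (-1) i (by omega) (by omega),
            rhs_neg s mp (i+1) (-1) i (by omega), rhs_pos s mp i dirn start hdirp]
          have hup : upEnd s (s.length - 1 - i) i = i :=
            upEnd_stop s _ i (fun hc => absurd hc.2 (by omega))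
          rw [hup, loopA_down s mp i hi (by omega) (by omega),
            downE_step s i ⟨hi, by omega⟩, List.append_assoc]
      · -- open falling run (dirn < 0)
        have hdirn : dirn < 0 := by omega
        by_cases hsame : s.getD i 0 ≥ s.getD (i+1) 0
        · have hst : stepB s mp (pairs, dirn, start) i = (pairs, dirn, start) := by
            simp only [stepB]
            rw [if_neg h0, if_neg]
            rintro ⟨hne, hiff⟩
            exact hiff (iff_of_false (by omega) (by omega))
          rw [hst, ih (i+1) pairs dirn start (by omega) (by omega),
            rhs_neg s mp (i+1) dirn start hdirn, rhs_neg s mp i dirn start hdirn,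
            downE_step s i ⟨hi, hsame⟩]
        · -- opposite step: close the falling run at i, reopen a rising run at i
          have hst : stepB s mp (pairs, dirn, start) i =
              (pairs ++ emitP s mp start i, 1, i) := by
            simp only [stepB]
            rw [if_neg h0, if_pos ⟨by omega, fun hiff => absurd (hiff.mp (by omega)) (by omega)⟩,
              if_pos (show s.getD (i+1) 0 - s.getD i 0 > 0 from by omega)]
            rfl
          rw [hst, ih (i+1) (pairs ++ emitP s mp start i) 1 i (by omega) (by omega),
            rhs_pos s mp (i+1) 1 i (by omega), rhs_neg s mp i dirn start hdirn]
          have hdn : downEnd s (s.length - 1 - i) i = i :=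
            downEnd_stop s _ i (fun hc => absurd hc.2 (by omega))
          rw [hdn, loopA_up s mp i hi (by omega),
            upE_step s i ⟨hi, by omega⟩, List.append_assoc]

-- ===== VERDICT (by name: the statement is the Claim_ definition above) =====
theorem find_minima_maxima_pairs_spec : Claim_equal_find_minima_maxima_pairs := by
  intro signal mp _
  unfold Spec_find_minima_maxima_pairs find_minima_maxima_pairs find_minima_maxima_pairs_alt
  rw [List.range_eq_range',
    main_lemma signal mp (signal.length - 1) 0 [] 0 0 (by omega) (by omega),
    rhs, if_pos rfl, List.nil_append, Nat.sub_zero]
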